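-- pv_equiv track=rewrite | github.com/cminahan/CPE101 | PROJECT3/funcs.py | find_vertical_up
-- ===== SOURCE A (Python) =====
-- def find_vertical_up(cols, word):
--     length = len(word)
--     final = 11 - length
--     tot = 0
--     start = 0
--     no = 'not in puzzle'
--     for row in range(10):
--         for column in range(final):
--             if cols[row][9-column] == word[0]:
--                 start = 9 - column
--                 for num in range(length):
--                     if cols[row][9 - column - num] == word[num]:
--                         tot += 1
--                 if tot == length:
--                     return True, "%s: (UP) row: %2d    column: %2d" %(word, start, row)
--                 else:
--                     start = 0
--                     tot = 0
--     if start == 0: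
--         return False, no
-- ===== SOURCE B (Python) =====
-- def _find_sub(hay, needle):
--     n = len(needle)
--     for i in range(len(hay) - n + 1):
--         if hay[i:i + n] == needle:
--             return i
--     return -1
--
--
-- def find_vertical_up(cols, word):
--     target = list(word)
--     for r, row in enumerate(cols[:10]):
--         rev = row[:10][::-1]
--         i = _find_sub(rev, target)
--         if i != -1:
--             return True, "%s: (UP) row: %2d    column: %2d" % (word, 9 - i, r)
--     return False, 'not in puzzle'
-- ===== Notes on version B (the rewrite author's own statement) =====
-- stated objective: idiomatic
-- what changed: Replaced the triple indexed loop with tot/start counter state by reversing each row's first 10 cells and running a leftmost slice-equality substring search (a find helper) for the word's character list, mapping the found index back to the start position.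
import Mathlib
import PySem

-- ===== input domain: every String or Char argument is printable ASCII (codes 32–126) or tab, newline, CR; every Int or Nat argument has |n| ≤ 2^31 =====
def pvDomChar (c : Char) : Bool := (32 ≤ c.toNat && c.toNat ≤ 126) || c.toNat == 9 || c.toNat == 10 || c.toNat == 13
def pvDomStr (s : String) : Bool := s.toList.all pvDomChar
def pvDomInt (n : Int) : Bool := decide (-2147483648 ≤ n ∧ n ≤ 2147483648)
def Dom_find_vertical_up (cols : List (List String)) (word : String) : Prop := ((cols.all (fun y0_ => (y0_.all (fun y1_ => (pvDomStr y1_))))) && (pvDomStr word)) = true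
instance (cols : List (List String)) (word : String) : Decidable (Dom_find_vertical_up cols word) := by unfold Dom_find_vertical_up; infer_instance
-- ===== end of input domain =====

-- B replaces A's triple indexed loop with tot/start counter state by a leftmost slice-equality
-- substring search over each row's reversed first-10 cells (idiomatic, not faster).

-- ===== PORT A =====
-- cols[row][idx]; defaults are only reachable outside Pre_ (Python raises IndexError there)
def pvCellA (cols : List (List String)) (row idx : Int) : String :=
  PySem.List.pyGetD (PySem.List.pyGetD cols row []) idx ""

-- word[i] as a 1-char string; "" only reachable outside Pre_ (Python raises IndexError there)
def pvWordAt (word : String) (i : Int) : String :=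
  match PySem.Str.pyGet? word i with
  | some c => String.singleton c
  | none => ""

-- "%2d" % n : right-justify str(n) to width 2 with spaces
def pvPad2 (n : Int) : String :=
  if PySem.Str.len (PySem.Int.toStr n) < 2 then " " ++ PySem.Int.toStr n else PySem.Int.toStr n

-- "%s: (UP) row: %2d    column: %2d" % (word, start, row)  (shared: both Pythons use this very format string)
def pvFmt (word : String) (start row : Int) : String :=
  word ++ ": (UP) row: " ++ pvPad2 start ++ "    column: " ++ pvPad2 row

-- inner 'for column in range(final)' with early return; tot/start are 0 at each iteration's entry
def pvARow (cols : List (List String)) (word : String) (length row : Int) : List Int → Option (Bool × String)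
  | [] => none
  | column :: rest =>
    if pvCellA cols row (9 - column) == pvWordAt word 0 then
      let start := 9 - column
      let tot := (PySem.List.pyRange 0 length).foldl
        (fun tot num => if pvCellA cols row (9 - column - num) == pvWordAt word num then tot + 1 else tot) (0 : Int)
      if tot == length then some (true, pvFmt word start row)
      else pvARow cols word length row rest
    else pvARow cols word length row rest

-- outer 'for row in range(10)' with early return
def pvAOuter (cols : List (List String)) (word : String) (length final : Int) : List Int → Option (Bool × String)
  | [] => none
  | row :: rest =>
    match pvARow cols word length row (PySem.List.pyRange 0 final) with
    | some out => some out
    | none => pvAOuter cols word length final rest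

def find_vertical_up (cols : List (List String)) (word : String) : Bool × String :=
  let length := PySem.Str.len word
  let final := 11 - length
  match pvAOuter cols word length final (PySem.List.pyRange 0 10) with
  | some out => out
  | none => (false, "not in puzzle")

-- ===== PORT B =====
-- _find_sub: leftmost index where hay[i:i+len(needle)] == needle, else -1
def pvFindSubLoop (hay needle : List String) : List Int → Int
  | [] => -1
  | i :: rest =>
    if PySem.List.slice hay (some i) (some (i + (needle.length : Int))) == needle then i
    else pvFindSubLoop hay needle rest

def pvFindSub (hay needle : List String) : Int :=
  pvFindSubLoop hay needle (PySem.List.pyRange 0 ((hay.length : Int) - (needle.length : Int) + 1))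

-- one loop body: rev = row[:10][::-1]; i = _find_sub(rev, target); early return if i != -1
def pvBRow (word : String) (target : List String) (r : Int) (row : List String) : Option (Bool × String) :=
  let rev := (PySem.List.slice row none (some 10)).reverse
  let i := pvFindSub rev target
  if i != -1 then some (true, pvFmt word (9 - i) r) else none

-- 'for r, row in enumerate(cols[:10])'
def pvBLoop (word : String) (target : List String) : List (Int × List String) → Option (Bool × String)
  | [] => none
  | (r, row) :: rest =>
    match pvBRow word target r row with
    | some out => some out
    | none => pvBLoop word target rest

def find_vertical_up_alt (cols : List (List String)) (word : String) : Bool × String :=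
  let target := word.toList.map (fun c => String.singleton c)
  match pvBLoop word target (PySem.List.enumerate (PySem.List.slice cols none (some 10))) with
  | some out => out
  | none => (false, "not in puzzle")

-- ===== PRECONDITION & SPEC =====
-- A raises IndexError on word = '' (word[0]) and, for len(word) ≤ 10, on grids without 10 rows of
-- 10 cells each (cols[row][9] is read for every scanned row).  Slightly narrower than A's exact
-- domain: we require all first 10 rows well-sized even when A returns early before reaching a
-- short row (stating that exactly would re-simulate the search).
def Pre_find_vertical_up (cols : List (List String)) (word : String) : Prop :=
  word.toList ≠ [] ∧
    (word.toList.length ≤ 10 → 10 ≤ cols.length ∧ ∀ row ∈ cols.take 10, 10 ≤ row.length)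
instance (cols : List (List String)) (word : String) : Decidable (Pre_find_vertical_up cols word) := by
  unfold Pre_find_vertical_up; infer_instance

def pvWitness_find_vertical_up : List (List String) × String :=
  (List.replicate 10 (List.replicate 10 "a"), "ba")

def Spec_find_vertical_up (cols : List (List String)) (word : String) (out : Bool × String) : Prop := out = find_vertical_up_alt cols word
instance (cols : List (List String)) (word : String) (out : Bool × String) : Decidable (Spec_find_vertical_up cols word out) := by unfold Spec_find_vertical_up; infer_instance

-- ===== CLAIM (what is proved, stated in full; the proofs are below) =====
def Claim_equal_find_vertical_up : Prop := ∀ (cols : List (List String)) (word : String), Dom_find_vertical_up cols word → Pre_find_vertical_up cols word → Spec_find_vertical_up cols word (find_vertical_up cols word)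

-- ===== LEMMAS AND PROOFS =====

lemma pv_pyGetD_eq_getD {α : Type} (xs : List α) (i : Int) (d : α) :
    PySem.List.pyGetD xs i d = (PySem.List.pyGet? xs i).getD d := by
  simp [PySem.List.pyGetD, PySem.List.pyGet?]

lemma pvCellA_eq (cols : List (List String)) (r : Int) (row : List String)
    (hget : PySem.List.pyGet? cols r = some row) (idx : Int) :
    pvCellA cols r idx = PySem.List.pyGetD row idx "" := by
  unfold pvCellA
  rw [pv_pyGetD_eq_getD cols r [], hget]
  rfl

-- when the word is longer than 11-1 cells, A's inner range is empty and it scans nothing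
lemma pvAOuter_of_nonpos (cols : List (List String)) (word : String) (length final : Int)
    (h : final ≤ 0) : ∀ rs, pvAOuter cols word length final rs = none := by
  intro rs
  induction rs with
  | nil => rfl
  | cons r rest ih =>
      simp [pvAOuter, PySem.List.pyRange_one_eq_nil h, pvARow, ih]

-- when the target has more than 10 cells, B's search range in every (≤10)-cell rev is empty
lemma pvBLoop_of_long (word : String) (target : List String) (h : 11 ≤ target.length) :
    ∀ ps, pvBLoop word target ps = none := by
  intro ps
  induction ps with
  | nil => rfl
  | cons p rest ih =>
      obtain ⟨r, row⟩ := p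
      have hrev : ((PySem.List.slice row none (some 10)).length : Int)
          - (target.length : Int) + 1 ≤ 0 := by
        have h1 : (PySem.List.slice row none (some 10)).length ≤ 10 := by
          rw [PySem.List.slice_to row (by norm_num)]
          simp
        omega
      simp only [pvBLoop, pvBRow, pvFindSub, List.length_reverse,
        PySem.List.pyRange_one_eq_nil hrev, pvFindSubLoop, ih]
      simp

-- pointwise: cell (9-c-k) of the row matches word[k] iff position k of the reversed-slice window agrees
lemma pv_point (row : List String) (word : String) (c : Int) (k : Nat)
    (hrow : 10 ≤ row.length) (hc0 : 0 ≤ c) (hcL : c + (word.toList.length : Int) ≤ 10)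
    (hk : k < word.toList.length) :
    ((PySem.List.pyGetD row (9 - c - (k:Int)) "" == pvWordAt word (k:Int)) = true)
    ↔ ((((PySem.List.slice row none (some 10)).reverse.drop c.toNat).take word.toList.length)[k]?
        = (word.toList.map (fun ch => String.singleton ch))[k]?) := by
  have hsl : PySem.List.slice row none (some 10) = row.take 10 := by
    rw [PySem.List.slice_to row (by norm_num)]; rfl
  have htl : (row.take 10).length = 10 := by simp; omega
  have hck : c.toNat + k < 10 := by omega
  have hidx : 10 - 1 - (c.toNat + k) < (row.take 10).length := by omega
  have hlhs : (((PySem.List.slice row none (some 10)).reverse.drop c.toNat).take word.toList.length)[k]?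
      = some (row.take 10)[10 - 1 - (c.toNat + k)] := by
    rw [hsl, List.getElem?_take, if_pos hk, List.getElem?_drop,
      List.getElem?_reverse (by omega), List.getElem?_eq_getElem (by omega)]
    simp [htl]
  have hget : (row.take 10)[10 - 1 - (c.toNat + k)]'hidx = row[(9 - c - (k:Int)).toNat]'(by omega) := by
    rw [List.getElem_take]
    congr 1
    omega
  have hword : pvWordAt word (k:Int) = String.singleton (word.toList[k]'hk) := by
    unfold pvWordAt
    rw [PySem.Str.pyGet?_natCast, List.getElem?_eq_getElem hk]
  have hcell : PySem.List.pyGetD row (9 - c - (k:Int)) "" = row[(9 - c - (k:Int)).toNat]'(by omega) := by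
    exact PySem.List.pyGetD_eq_getElem row "" (by omega) (by omega)
  rw [hlhs, hget, hword, hcell, List.getElem?_map, List.getElem?_eq_getElem hk]
  simp [beq_iff_eq]

-- the whole window equals the target iff every position matches
lemma pv_slice_iff (row : List String) (word : String) (c : Int)
    (hrow : 10 ≤ row.length) (hc0 : 0 ≤ c) (hcL : c + (word.toList.length : Int) ≤ 10) :
    (PySem.List.slice ((PySem.List.slice row none (some 10)).reverse) (some c)
        (some (c + (word.toList.length : Int)))
      = word.toList.map (fun ch => String.singleton ch))
    ↔ ∀ k : Nat, k < word.toList.length →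
        (PySem.List.pyGetD row (9 - c - (k:Int)) "" == pvWordAt word (k:Int)) = true := by
  have hsl : PySem.List.slice row none (some 10) = row.take 10 := by
    rw [PySem.List.slice_to row (by norm_num)]; rfl
  have htl : (row.take 10).length = 10 := by simp; omega
  have hsl2 : PySem.List.slice ((PySem.List.slice row none (some 10)).reverse) (some c)
      (some (c + (word.toList.length : Int)))
      = ((PySem.List.slice row none (some 10)).reverse.drop c.toNat).take word.toList.length := by
    rw [PySem.List.slice_toNat _ hc0 (by omega)]
    congr 1
    omega
  rw [hsl2]
  constructor
  · intro h k hk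
    rw [pv_point row word c k hrow hc0 hcL hk, h]
  · intro h
    apply List.ext_getElem?
    intro k
    by_cases hk : k < word.toList.length
    · exact ((pv_point row word c k hrow hc0 hcL hk).mp (h k hk))
    · rw [List.getElem?_eq_none (by rw [List.length_take]; omega),
        List.getElem?_eq_none (by rw [List.length_map]; omega)]

-- A's tot is a countP over range(len(word))
lemma pv_tot (cols : List (List String)) (word : String) (r : Int) (row : List String)
    (hget : PySem.List.pyGet? cols r = some row) (c : Int) :
    (PySem.List.pyRange 0 (word.toList.length : Int)).foldl
      (fun tot num => if pvCellA cols r (9 - c - num) == pvWordAt word num then tot + 1 else tot) (0 : Int)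
    = ((List.range word.toList.length).countP
        (fun k : Nat => PySem.List.pyGetD row (9 - c - (k:Int)) "" == pvWordAt word (k:Int)) : Int) := by
  rw [PySem.List.pyRange_one, List.foldl_map]
  simp only [Int.sub_zero, Int.toNat_natCast, zero_add]
  have hcong : (fun (x : Int) (k : Nat) =>
        if (pvCellA cols r (9 - c - (k:Int)) == pvWordAt word (k:Int)) = true then x + 1 else x)
      = (fun (x : Int) (k : Nat) =>
        if (PySem.List.pyGetD row (9 - c - (k:Int)) "" == pvWordAt word (k:Int)) = true then x + 1 else x) := by
    funext x k
    rw [pvCellA_eq cols r row hget]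
  rw [hcong, PySem.List.foldl_count_if]
  simp

-- per-candidate / per-row: A's descending scan with tot equals B's find over the reversed window
lemma pv_inner (cols : List (List String)) (word : String) (r : Int) (row : List String)
    (hget : PySem.List.pyGet? cols r = some row) (hrow : 10 ≤ row.length)
    (hw : word.toList ≠ []) :
    ∀ cs : List Int, (∀ c ∈ cs, 0 ≤ c ∧ c + (word.toList.length : Int) ≤ 10) →
    pvARow cols word (word.toList.length : Int) r cs
      = (if (pvFindSubLoop ((PySem.List.slice row none (some 10)).reverse)
              (word.toList.map (fun ch => String.singleton ch)) cs) != -1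
         then some (true, pvFmt word
           (9 - pvFindSubLoop ((PySem.List.slice row none (some 10)).reverse)
              (word.toList.map (fun ch => String.singleton ch)) cs) r)
         else none) := by
  intro cs
  induction cs with
  | nil => intro _; rfl
  | cons c rest ih =>
    intro hb
    obtain ⟨hc0, hcL⟩ := hb c List.mem_cons_self
    have hbrest := fun c hc => hb c (List.mem_cons_of_mem _ hc)
    have hLpos : 0 < word.toList.length := List.length_pos_of_ne_nil hw
    simp only [pvFindSubLoop, List.length_map]
    by_cases hs : PySem.List.slice ((PySem.List.slice row none (some 10)).reverse) (some c)
        (some (c + (word.toList.length : Int)))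
        = word.toList.map (fun ch => String.singleton ch)
    · have hall := (pv_slice_iff row word c hrow hc0 hcL).mp hs
      have h0 : (pvCellA cols r (9 - c) == pvWordAt word 0) = true := by
        have h00 := hall 0 hLpos
        rw [pvCellA_eq cols r row hget]
        simpa using h00
      have htot : ((List.range word.toList.length).countP
          (fun k : Nat => PySem.List.pyGetD row (9 - c - (k:Int)) "" == pvWordAt word (k:Int)))
          = word.toList.length := by
        have := List.countP_eq_length.mpr
          (fun k hk => hall k (List.mem_range.mp hk))
        simpa using this
      have hcne : (c != -1) = true := by
        simp only [bne_iff_ne, ne_eq]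
        omega
      simp only [pvARow, h0, if_true, pv_tot cols word r row hget c, htot,
        if_pos ((beq_iff_eq).mpr hs), hcne, beq_self_eq_true]
    · have hsb : ¬ ((PySem.List.slice ((PySem.List.slice row none (some 10)).reverse) (some c)
          (some (c + (word.toList.length : Int)))
          == word.toList.map (fun ch => String.singleton ch)) = true) := by
        simp only [beq_iff_eq]
        exact hs
      rw [if_neg hsb]
      by_cases h0 : (pvCellA cols r (9 - c) == pvWordAt word 0) = true
      · have hne : ((List.range word.toList.length).countP
            (fun k : Nat => PySem.List.pyGetD row (9 - c - (k:Int)) "" == pvWordAt word (k:Int)))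
            ≠ word.toList.length := by
          intro he
          apply hs
          apply (pv_slice_iff row word c hrow hc0 hcL).mpr
          intro k hk
          exact List.countP_eq_length.mp (by simpa using he) (k : Nat) (List.mem_range.mpr hk)
        simp only [pvARow, h0, if_true, pv_tot cols word r row hget c]
        rw [if_neg (by simpa using hne)]
        exact ih hbrest
      · simp only [pvARow, if_neg h0]
        exact ih hbrest

lemma pv_row (cols : List (List String)) (word : String) (r : Int) (row : List String)
    (hget : PySem.List.pyGet? cols r = some row) (hrow : 10 ≤ row.length)
    (hw : word.toList ≠ []) :
    pvARow cols word (word.toList.length : Int) r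
      (PySem.List.pyRange 0 (11 - (word.toList.length : Int)))
    = pvBRow word (word.toList.map (fun ch => String.singleton ch)) r row := by
  have hslrow : PySem.List.slice row none (some 10) = row.take 10 := by
    rw [PySem.List.slice_to row (by norm_num)]; rfl
  have hrevlen : (PySem.List.slice row none (some 10)).reverse.length = 10 := by
    rw [hslrow]
    simp
    omega
  simp only [pvBRow, pvFindSub]
  have hb : ((PySem.List.slice row none (some 10)).reverse.length : Int)
      - ((word.toList.map (fun ch => String.singleton ch)).length : Int) + 1
      = 11 - (word.toList.length : Int) := by
    rw [hrevlen, List.length_map]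
    push_cast
    ring
  rw [hb]
  apply pv_inner cols word r row hget hrow hw
  intro c hc
  have h2 := PySem.List.mem_pyRange_one.mp hc
  omega

lemma pv_outer (cols : List (List String)) (word : String)
    (hw : word.toList ≠ []) :
    ∀ ps : List (Int × List String),
    (∀ p ∈ ps, PySem.List.pyGet? cols p.1 = some p.2 ∧ 10 ≤ p.2.length) →
    pvAOuter cols word (word.toList.length : Int) (11 - (word.toList.length : Int))
        (ps.map (·.1))
      = pvBLoop word (word.toList.map (fun ch => String.singleton ch)) ps := by
  intro ps
  induction ps with
  | nil => intro _; rfl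
  | cons p rest ih =>
    intro hp
    obtain ⟨r, row⟩ := p
    obtain ⟨hget, hrow⟩ := hp (r, row) List.mem_cons_self
    simp only [List.map_cons, pvAOuter, pvBLoop]
    rw [pv_row cols word r row hget hrow hw,
      ih (fun q hq => hp q (List.mem_cons_of_mem _ hq))]

theorem find_vertical_up_spec : Claim_equal_find_vertical_up := by
  intro cols word _hdom hpre
  obtain ⟨hw, hgrid⟩ := hpre
  unfold Spec_find_vertical_up
  simp only [find_vertical_up, find_vertical_up_alt]
  rw [PySem.Str.len_eq]
  by_cases hL : word.toList.length ≤ 10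
  · obtain ⟨hc, hrows⟩ := hgrid hL
    have hsl : PySem.List.slice cols none (some 10) = cols.take 10 := by
      rw [PySem.List.slice_to cols (by norm_num)]; rfl
    have hlen : (cols.take 10).length = 10 := by simp; omega
    have hmap : (PySem.List.enumerate (PySem.List.slice cols none (some 10))).map (·.1)
        = PySem.List.pyRange 0 10 := by
      rw [PySem.List.map_fst_enumerate, hsl, hlen]
      norm_num
    have hprop : ∀ p ∈ PySem.List.enumerate (PySem.List.slice cols none (some 10)),
        PySem.List.pyGet? cols p.1 = some p.2 ∧ 10 ≤ p.2.length := by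
      intro p hp
      rw [hsl] at hp
      obtain ⟨k, hk, rfl⟩ := (PySem.List.mem_enumerate_iff _ _ _).mp hp
      have hk10 : k < 10 := by omega
      constructor
      · simp only [zero_add]
        rw [PySem.List.pyGet?_natCast cols k, List.getElem?_eq_getElem (by omega)]
        congr 1
        exact (List.getElem_take).symm
      · exact hrows _ (List.getElem_mem _)  -- membership of cols.take 10
    rw [← hmap, pv_outer cols word hw _ hprop]
  · rw [pvAOuter_of_nonpos cols word ((word.toList.length : Int))
          (11 - (word.toList.length : Int)) (by omega) (PySem.List.pyRange 0 10),
        pvBLoop_of_long word (word.toList.map (fun c => String.singleton c))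
          (by rw [List.length_map]; omega)
          (PySem.List.enumerate (PySem.List.slice cols none (some 10)))]
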